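-- pv_equiv track=rewrite | github.com/TheOriginalSoni/pyramid | pyramid.py | list_anagrams_plus_n
-- ===== SOURCE A (Python) =====
-- import itertools
--
-- def list_anagrams_plus_n(listwords,sortedwords,n):
-- 	l_anag = set()
-- 	y = list(itertools.permutations(['a','b','c','d','e','f','g','h','i','j','k','l','m','n','o','p','q','r','s','t','u','v','w','x','y','z'],n))
-- 	a = list(map(lambda x:"".join(x),y))
-- 	for x in listwords:
-- 		for xadd in a:
-- 			sx = "".join(sorted(x+xadd))
-- 			if sx in sortedwords:
-- 				if(n==0):
-- 					if(len(sortedwords[sx])>1):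
-- 						l_anag.add(x)
-- 				else:
-- 					l_anag.add(x)
-- 	return l_anag
-- ===== SOURCE B (Python) =====
-- import itertools
--
-- def list_anagrams_plus_n(listwords, sortedwords, n):
--     # Work from the dictionary side: from every sorted key, delete every
--     # combination of n distinct lowercase letters it contains, collecting the
--     # reachable "cores"; a word matches iff its sorted form is a core.
--     found = set()
--     if n == 0:
--         for x in listwords:
--             sx = "".join(sorted(x))
--             if sx in sortedwords and len(sortedwords[sx]) > 1:
--                 found.add(x)
--         return found
--     cores = set()
--     for k in sortedwords:
--         ks = list(k)
--         if ks != sorted(ks):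
--             continue  # only sorted keys can ever be hit by A's sorted probes
--         letters = sorted(set(c for c in ks if 'a' <= c <= 'z'))
--         for combo in itertools.combinations(letters, n):
--             rest = list(ks)
--             for c in combo:
--                 rest.remove(c)
--             cores.add("".join(rest))
--     for x in listwords:
--         if "".join(sorted(x)) in cores:
--             found.add(x)
--     return found
-- ===== Notes on version B (the rewrite author's own statement) =====
-- stated objective: alternative
-- what changed: A adds letters to each word, probing the dictionary with every permutation of n alphabet letters; B works from the dictionary side: it deletes every combination of n distinct lowercase letters from each sorted key once, collecting the reachable cores in a set, and then tests each word by a single lookup of its sorted form.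
import Mathlib
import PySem

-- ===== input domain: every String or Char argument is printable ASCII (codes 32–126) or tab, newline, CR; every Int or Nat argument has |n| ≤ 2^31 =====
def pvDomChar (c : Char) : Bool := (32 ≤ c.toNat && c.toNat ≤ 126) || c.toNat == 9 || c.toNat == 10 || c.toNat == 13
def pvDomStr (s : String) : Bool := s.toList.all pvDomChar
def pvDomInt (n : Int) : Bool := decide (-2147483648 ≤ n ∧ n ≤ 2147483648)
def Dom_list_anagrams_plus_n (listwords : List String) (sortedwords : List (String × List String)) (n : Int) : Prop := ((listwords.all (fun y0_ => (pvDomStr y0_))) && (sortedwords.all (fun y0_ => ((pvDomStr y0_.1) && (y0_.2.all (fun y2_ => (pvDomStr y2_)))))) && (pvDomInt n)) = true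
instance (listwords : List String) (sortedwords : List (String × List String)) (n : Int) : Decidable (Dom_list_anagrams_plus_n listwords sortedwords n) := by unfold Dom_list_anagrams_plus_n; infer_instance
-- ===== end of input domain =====

-- B works from the dictionary side: from every sorted key it deletes every combination of n
-- distinct lowercase letters, collecting the reachable cores in a set, and a word matches iff
-- its sorted form is a core (alternative algorithm; not claimed faster).

-- ===== PORT A =====
-- shared idiom of both Pythons: `"".join(sorted(cs))` (identity sort key; exact on ASCII)
def pvSortKey (cs : List Char) : String := String.ofList (PySem.List.sorted cs (fun c => c))

-- A's literal alphabet list ['a', …, 'z']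
def pvPool : List Char := ['a','b','c','d','e','f','g','h','i','j','k','l','m','n','o','p','q','r','s','t','u','v','w','x','y','z']

def list_anagrams_plus_n (listwords : List String) (sortedwords : List (String × List String)) (n : Int) : List String :=
  -- the dict argument, as Python received it
  let d : PySem.Dict String (List String) := PySem.Dict.ofList sortedwords
  -- itertools.permutations(pool, r): CPython returns at once when r > len(pool); the guard is
  -- that early exit (same value as the unguarded primitive by PySem.List.permutations_eq_nil_of_length_lt)
  let y : List (List Char) := if pvPool.length < n.toNat then [] else PySem.List.permutations pvPool n.toNat
  let a : List String := y.map (fun t => String.ofList t)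
  listwords.foldl (fun l_anag x =>
    a.foldl (fun l_anag xadd =>
      let sx := pvSortKey (x.toList ++ xadd.toList)
      if d.contains sx then
        if n == 0 then
          if (d.getD sx []).length > 1 then PySem.Set.add l_anag x else l_anag
        else PySem.Set.add l_anag x
      else l_anag) l_anag) PySem.Set.empty

-- ===== PORT B =====
-- `sorted(set(c for c in ks if 'a' <= c <= 'z'))`
def pvLetters (ks : List Char) : List Char :=
  PySem.List.sorted (PySem.Set.ofList (ks.filter (fun c => 'a' ≤ c && c ≤ 'z'))) (fun c => c)

-- the `cores` set built by B's key loop: every sorted key minus every combination of r of its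
-- distinct lowercase letters (`rest.remove(c)` never fails — each deleted letter is present —
-- so the `.getD rest` default is unreachable)
def pvCores (keys : List String) (r : Nat) : PySem.Set String :=
  keys.foldl (fun cores k =>
    if k.toList = PySem.List.sorted k.toList (fun c => c) then
      (PySem.List.combinations (pvLetters k.toList) r).foldl (fun cores combo =>
        PySem.Set.add cores (String.ofList
          (combo.foldl (fun rest c => (PySem.List.remove? rest c).getD rest) k.toList)))
        cores
    else cores) PySem.Set.empty

def list_anagrams_plus_n_alt (listwords : List String) (sortedwords : List (String × List String)) (n : Int) : List String :=
  let d : PySem.Dict String (List String) := PySem.Dict.ofList sortedwords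
  if n == 0 then
    listwords.foldl (fun found x =>
      let sx := pvSortKey x.toList
      if d.contains sx && decide ((d.getD sx []).length > 1) then PySem.Set.add found x else found)
      PySem.Set.empty
  else
    let cores : PySem.Set String := pvCores d.keys n.toNat
    listwords.foldl (fun found x =>
      if PySem.Set.contains cores (pvSortKey x.toList) then PySem.Set.add found x else found)
      PySem.Set.empty

-- ===== PRECONDITION & SPEC =====
-- Pre_ excludes only n < 0, where Python's itertools.permutations raises ValueError.
def Pre_list_anagrams_plus_n (listwords : List String) (sortedwords : List (String × List String)) (n : Int) : Prop := 0 ≤ n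
instance (listwords : List String) (sortedwords : List (String × List String)) (n : Int) : Decidable (Pre_list_anagrams_plus_n listwords sortedwords n) := by unfold Pre_list_anagrams_plus_n; infer_instance

def pvWitness_list_anagrams_plus_n : List String × (List (String × List String)) × Int :=
  (["ab", "ba", "cx"], [("ab", ["ab", "ba"]), ("cx", ["cx"])], 0)

def Spec_list_anagrams_plus_n (listwords : List String) (sortedwords : List (String × List String)) (n : Int) (out : List String) : Prop := out = list_anagrams_plus_n_alt listwords sortedwords n
instance (listwords : List String) (sortedwords : List (String × List String)) (n : Int) (out : List String) : Decidable (Spec_list_anagrams_plus_n listwords sortedwords n out) := by unfold Spec_list_anagrams_plus_n; infer_instance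

-- ===== CLAIM (what is proved, stated in full; the proofs are below) =====
def Claim_equal_list_anagrams_plus_n : Prop := ∀ (listwords : List String) (sortedwords : List (String × List String)) (n : Int), Dom_list_anagrams_plus_n listwords sortedwords n → Pre_list_anagrams_plus_n listwords sortedwords n → Spec_list_anagrams_plus_n listwords sortedwords n (list_anagrams_plus_n listwords sortedwords n)

-- ===== LEMMAS AND PROOFS =====

-- membership in A's alphabet literal is exactly the range check of B
theorem pv_mem_pool_iff (c : Char) : c ∈ pvPool ↔ ('a' ≤ c ∧ c ≤ 'z') := by
  constructor
  · intro h
    fin_cases h <;> exact ⟨by decide, by decide⟩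
  · rintro ⟨h1, h2⟩
    have hlo : 97 ≤ c.toNat := by
      simpa [Char.le_def, UInt32.le_iff_toNat_le] using h1
    have hhi : c.toNat ≤ 122 := by
      simpa [Char.le_def, UInt32.le_iff_toNat_le] using h2
    unfold pvPool
    interval_cases h : c.toNat <;> (rw [← Char.ofNat_toNat c, h]; decide)

theorem pv_pool_pairwise : pvPool.Pairwise (· < ·) := by unfold pvPool; decide

-- structural unfolding of PySem.List.permutations at a successor count
theorem pv_permutations_succ (xs : List Char) (r : Nat) : PySem.List.permutations xs (r+1)
    = (List.range xs.length).flatMap (fun i => match xs[i]? with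
        | none => []
        | some x => (PySem.List.permutations (xs.eraseIdx i) r).map (fun p => x :: p)) := by
  rw [PySem.List.permutations]
  refine congrArg₂ _ ?_ rfl
  funext i
  cases xs[i]? <;> rfl

-- every subpermutation of xs of length r occurs among the r-permutations of xs
theorem pv_mem_permutations_of_subperm : ∀ (p xs : List Char), p.Subperm xs →
    p ∈ PySem.List.permutations xs p.length
  | [], xs, _ => by simp [PySem.List.permutations_zero]
  | c :: t, xs, h => by
    have hc : c ∈ xs := h.subset (List.mem_cons_self)
    obtain ⟨i, hi, hxi⟩ := List.getElem_of_mem hc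
    have hperm : xs.Perm (c :: xs.eraseIdx i) := by
      have h' := List.getElem_cons_eraseIdx_perm (l := xs) hi
      rw [hxi] at h'
      exact h'.symm
    have ht : t.Subperm (xs.eraseIdx i) := (List.subperm_cons c).mp (h.trans hperm.subperm)
    have ih := pv_mem_permutations_of_subperm t _ ht
    show c :: t ∈ PySem.List.permutations xs (t.length + 1)
    rw [pv_permutations_succ]
    refine List.mem_flatMap.mpr ⟨i, List.mem_range.mpr hi, ?_⟩
    simp only [List.getElem?_eq_getElem hi, hxi]
    exact List.mem_map.mpr ⟨t, ih, rfl⟩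

-- a permutation-invariant predicate holds on some r-permutation iff on some r-combination
theorem pv_any_perm_eq_any_comb (xs : List Char) (r : Nat) (P : List Char → Bool)
    (hP : ∀ u v : List Char, u.Perm v → P u = P v) :
    (PySem.List.permutations xs r).any P = (PySem.List.combinations xs r).any P := by
  apply Bool.eq_iff_iff.mpr
  simp only [List.any_eq_true]
  constructor
  · rintro ⟨w, hw, hPw⟩
    obtain ⟨hlen, rest, hrperm⟩ := PySem.List.exists_perm_of_mem_permutations r xs w hw
    have hsub : w.Subperm xs := ((List.sublist_append_left w rest).subperm).trans hrperm.subperm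
    obtain ⟨l, hlp, hls⟩ := hsub
    refine ⟨l, (PySem.List.mem_combinations_iff xs r l).mpr ⟨hls, by rw [hlp.length_eq, hlen]⟩, ?_⟩
    rw [hP l w hlp]; exact hPw
  · rintro ⟨w, hw, hPw⟩
    obtain ⟨hs, hl⟩ := (PySem.List.mem_combinations_iff xs r w).mp hw
    exact ⟨w, hl ▸ pv_mem_permutations_of_subperm w xs hs.subperm, hPw⟩

theorem pv_add_idem (s : PySem.Set String) (x : String) :
    PySem.Set.add (PySem.Set.add s x) x = PySem.Set.add s x := by
  simp only [PySem.Set.add, PySem.Set.contains]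
  split_ifs with h1 h2 <;> simp_all

-- a scan that conditionally adds the SAME element collapses to one conditional add
theorem pv_foldl_if_add {β : Type} (cond : β → Bool) (x : String) :
    ∀ (l : List β) (s : PySem.Set String),
    l.foldl (fun s e => if cond e then PySem.Set.add s x else s) s
      = if l.any cond then PySem.Set.add s x else s
  | [], s => by simp
  | e :: l, s => by
    by_cases hc : cond e
    · rw [List.foldl_cons, if_pos hc, pv_foldl_if_add cond x l (PySem.Set.add s x)]
      by_cases h2 : l.any cond <;> simp [h2, hc, pv_add_idem]
    · simp [hc, pv_foldl_if_add cond x l s]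

-- membership through the inner loop that adds one core per combination
theorem pv_mem_inner (g : List (List Char)) (f : List Char → String) (x : String)
    (s : PySem.Set String) :
    x ∈ g.foldl (fun s b => PySem.Set.add s (f b)) s ↔ x ∈ s ∨ ∃ b ∈ g, x = f b := by
  induction g generalizing s with
    | nil => simp
    | cons b g ih =>
      rw [List.foldl_cons, ih]
      rw [PySem.Set.mem_add]
      constructor
      · rintro (⟨h | h⟩ | ⟨b', hb', hx⟩)
        · exact Or.inl h
        · exact Or.inr ⟨b, List.mem_cons_self, h⟩
        · exact Or.inr ⟨b', List.mem_cons_of_mem _ hb', hx⟩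
      · rintro (h | ⟨b', hb', hx⟩)
        · exact Or.inl (Or.inl h)
        · rcases List.mem_cons.mp hb' with he | he
          · exact Or.inl (Or.inr (he ▸ hx))
          · exact Or.inr ⟨b', he, hx⟩

-- membership in the cores set: some sorted key minus some r-combination of its letters
theorem pv_mem_cores_aux (r : Nat) (x : String) : ∀ (keys : List String) (s : PySem.Set String),
    x ∈ keys.foldl (fun cores k =>
      if k.toList = PySem.List.sorted k.toList (fun c => c) then
        (PySem.List.combinations (pvLetters k.toList) r).foldl (fun cores combo =>
          PySem.Set.add cores (String.ofList
            (combo.foldl (fun rest c => (PySem.List.remove? rest c).getD rest) k.toList)))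
          cores
      else cores) s
    ↔ x ∈ s ∨ ∃ k ∈ keys, k.toList = PySem.List.sorted k.toList (fun c => c) ∧
        ∃ combo ∈ PySem.List.combinations (pvLetters k.toList) r,
          x = String.ofList (combo.foldl (fun rest c => (PySem.List.remove? rest c).getD rest) k.toList)
  | [], s => by simp
  | k :: keys, s => by
    rw [List.foldl_cons, pv_mem_cores_aux r x keys]
    by_cases hk : k.toList = PySem.List.sorted k.toList (fun c => c)
    · rw [if_pos hk, pv_mem_inner]
      constructor
      · rintro (⟨h | ⟨combo, hc, hx⟩⟩ | ⟨k', hk', hs, h⟩)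
        · exact Or.inl h
        · exact Or.inr ⟨k, List.mem_cons_self, hk, combo, hc, hx⟩
        · exact Or.inr ⟨k', List.mem_cons_of_mem _ hk', hs, h⟩
      · rintro (h | ⟨k', hk', hs, h⟩)
        · exact Or.inl (Or.inl h)
        · rcases List.mem_cons.mp hk' with he | he
          · subst he
            exact Or.inl (Or.inr h)
          · exact Or.inr ⟨k', he, hs, h⟩
    · rw [if_neg hk]
      constructor
      · rintro (h | ⟨k', hk', hs, h⟩)
        · exact Or.inl h
        · exact Or.inr ⟨k', List.mem_cons_of_mem _ hk', hs, h⟩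
      · rintro (h | ⟨k', hk', hs, h⟩)
        · exact Or.inl h
        · rcases List.mem_cons.mp hk' with he | he
          · subst he
            exact absurd hs hk
          · exact Or.inr ⟨k', he, hs, h⟩

theorem pv_mem_cores (keys : List String) (r : Nat) (x : String) :
    x ∈ pvCores keys r ↔ ∃ k ∈ keys, k.toList = PySem.List.sorted k.toList (fun c => c) ∧
        ∃ combo ∈ PySem.List.combinations (pvLetters k.toList) r,
          x = String.ofList (combo.foldl (fun rest c => (PySem.List.remove? rest c).getD rest) k.toList) := by
  rw [pvCores, pv_mem_cores_aux]
  simp [PySem.Set.empty]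

-- the removal loop on a sorted list: it stays sorted and deletes exactly the multiset of
-- the (distinct, all present) removed letters
theorem pv_fold_remove : ∀ (t k : List Char), t.Nodup → (∀ c ∈ t, c ∈ k) →
    k.Pairwise (· ≤ ·) →
    (t.foldl (fun rest c => (PySem.List.remove? rest c).getD rest) k).Pairwise (· ≤ ·) ∧
    k.Perm ((t.foldl (fun rest c => (PySem.List.remove? rest c).getD rest) k) ++ t)
  | [], k, _, _, hk => ⟨hk, by simp⟩
  | c :: t, k, hnd, hmem, hk => by
    have hc : c ∈ k := hmem c List.mem_cons_self
    rw [List.foldl_cons, PySem.List.remove?_eq_some_erase k c hc, Option.getD_some]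
    have hnd' := (List.nodup_cons.mp hnd).2
    have hcnot := (List.nodup_cons.mp hnd).1
    have hmem' : ∀ e ∈ t, e ∈ k.erase c := by
      intro e he
      exact (List.mem_erase_of_ne (fun h => hcnot (by rw [← h]; exact he))).mpr
        (hmem e (List.mem_cons_of_mem _ he))
    have hk' : (k.erase c).Pairwise (· ≤ ·) := List.Pairwise.sublist List.erase_sublist hk
    obtain ⟨hpw, hperm⟩ := pv_fold_remove t (k.erase c) hnd' hmem' hk'
    refine ⟨hpw, ?_⟩
    exact (List.perm_cons_erase hc).trans ((hperm.cons c).trans List.perm_middle.symm)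

-- a strictly increasing list included in a strictly increasing list is a sublist of it
theorem pv_sublist_of_pairwise_subset (u v : List Char) (hu : u.Pairwise (· < ·))
    (hv : v.Pairwise (· < ·)) (hsub : u ⊆ v) : u.Sublist v := by
  obtain ⟨l, hlp, hls⟩ := List.subperm_of_subset hu.nodup hsub
  have hl : l.Pairwise (· < ·) := List.Pairwise.sublist hls hv
  have : l = u := PySem.List.eq_of_perm_of_pairwise_le hlp
    (hl.imp le_of_lt) (hu.imp le_of_lt)
  exact this ▸ hls

theorem pv_mem_letters (ks : List Char) (c : Char) :
    c ∈ pvLetters ks ↔ (c ∈ ks ∧ 'a' ≤ c ∧ c ≤ 'z') := by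
  rw [pvLetters, PySem.List.mem_sorted, PySem.Set.mem_ofList, List.mem_filter]
  simp

-- the per-word condition: some n-combination of the alphabet completes x to a key
-- iff x's sorted form is a reachable core
theorem pv_comb_eq_cores (d : PySem.Dict String (List String)) (x : String) (r : Nat) :
    (PySem.List.combinations pvPool r).any
        (fun t => d.contains (pvSortKey (x.toList ++ t)))
      = PySem.Set.contains (pvCores d.keys r) (pvSortKey x.toList) := by
  set sx := PySem.List.sorted x.toList (fun c => c) with hsx
  have hsxperm : sx.Perm x.toList := PySem.List.sorted_perm _ _ _
  have hsxpw : sx.Pairwise (· ≤ ·) := PySem.List.sorted_pairwise _ _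
  apply Bool.eq_iff_iff.mpr
  rw [PySem.Set.contains_iff, pv_mem_cores]
  simp only [List.any_eq_true]
  constructor
  · rintro ⟨t, ht, hc⟩
    obtain ⟨hts, htl⟩ := (PySem.List.mem_combinations_iff _ _ _).mp ht
    have htpw : t.Pairwise (· < ·) := List.Pairwise.sublist hts pv_pool_pairwise
    have htrange : ∀ c ∈ t, 'a' ≤ c ∧ c ≤ 'z' :=
      fun c hc' => (pv_mem_pool_iff c).mp (hts.subset hc')
    set k := pvSortKey (x.toList ++ t) with hk
    have hkl : k.toList = PySem.List.sorted (x.toList ++ t) (fun c => c) := by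
      rw [hk, pvSortKey, String.toList_ofList]
    have hkpw : k.toList.Pairwise (· ≤ ·) := by
      rw [hkl]; exact PySem.List.sorted_pairwise _ _
    have hkperm : k.toList.Perm (sx ++ t) := by
      rw [hkl]
      exact (PySem.List.sorted_perm _ _ _).trans (hsxperm.symm.append_right t)
    refine ⟨k, (PySem.Dict.contains_iff_mem_keys _ _).mp hc, ?_, t, ?_, ?_⟩
    · rw [hkl, PySem.List.sorted_sorted]
    · apply (PySem.List.mem_combinations_iff _ _ _).mpr
      refine ⟨pv_sublist_of_pairwise_subset t _ htpw (PySem.List.sorted_ofList_pairwise_lt _) ?_, htl⟩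
      intro c hc'
      exact (pv_mem_letters _ c).mpr ⟨hkperm.symm.subset (List.mem_append_right sx hc'), htrange c hc'⟩
    · obtain ⟨hpw, hperm⟩ := pv_fold_remove t k.toList htpw.nodup
        (fun c hc' => hkperm.symm.subset (List.mem_append_right sx hc')) hkpw
      have hres : (t.foldl (fun rest c => (PySem.List.remove? rest c).getD rest) k.toList).Perm sx :=
        (List.perm_append_right_iff t).mp (hperm.symm.trans hkperm)
      rw [pvSortKey, ← hsx,
        PySem.List.eq_of_perm_of_pairwise_le hres.symm hsxpw hpw]
  · rintro ⟨k, hkmem, hksorted, combo, hcombo, hxval⟩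
    have hkpw : k.toList.Pairwise (· ≤ ·) := by
      rw [hksorted]; exact PySem.List.sorted_pairwise _ _
    obtain ⟨hcs, hcl⟩ := (PySem.List.mem_combinations_iff _ _ _).mp hcombo
    have hcpw : combo.Pairwise (· < ·) :=
      List.Pairwise.sublist hcs (PySem.List.sorted_ofList_pairwise_lt _)
    have hcmem : ∀ c ∈ combo, c ∈ k.toList ∧ 'a' ≤ c ∧ c ≤ 'z' :=
      fun c hc' => (pv_mem_letters _ c).mp (hcs.subset hc')
    obtain ⟨hpw, hperm⟩ := pv_fold_remove combo k.toList hcpw.nodup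
      (fun c hc' => (hcmem c hc').1) hkpw
    have hres : combo.foldl (fun rest c => (PySem.List.remove? rest c).getD rest) k.toList = sx := by
      have := congrArg String.toList hxval
      rw [pvSortKey, String.toList_ofList, String.toList_ofList] at this
      rw [← this, hsx]
    refine ⟨combo, ?_, ?_⟩
    · apply (PySem.List.mem_combinations_iff _ _ _).mpr
      refine ⟨pv_sublist_of_pairwise_subset combo _ hcpw pv_pool_pairwise ?_, hcl⟩
      intro c hc'
      exact (pv_mem_pool_iff c).mpr (hcmem c hc').2
    · have hkey : pvSortKey (x.toList ++ combo) = k := by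
        have hp : (PySem.List.sorted (x.toList ++ combo) (fun c => c)).Perm k.toList := by
          refine (PySem.List.sorted_perm _ _ _).trans ?_
          refine ((hsxperm.symm).append_right combo).trans ?_
          rw [← hres]
          exact hperm.symm
        rw [pvSortKey, PySem.List.eq_of_perm_of_pairwise_le hp (PySem.List.sorted_pairwise _ _) hkpw,
          String.ofList_toList]
      rw [hkey]
      exact (PySem.Dict.contains_iff_mem_keys _ _).mpr hkmem

-- ===== VERDICT (by name: the statement is the Claim_ definition above) =====
theorem list_anagrams_plus_n_spec : Claim_equal_list_anagrams_plus_n := by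
  intro listwords sortedwords n hdom hpre
  unfold Spec_list_anagrams_plus_n list_anagrams_plus_n list_anagrams_plus_n_alt
  by_cases h0 : n = 0
  · subst h0
    simp only [Int.toNat_zero, PySem.List.permutations_zero, if_neg (by decide :
      ¬ pvPool.length < 0), beq_self_eq_true, if_pos,
      List.map_cons, List.map_nil]
    apply PySem.List.foldl_congr_mem
    intro acc x _
    simp only [List.foldl_cons, List.foldl_nil, String.toList_ofList, List.append_nil]
    by_cases hc : (PySem.Dict.ofList sortedwords).contains (pvSortKey x.toList) <;>
      by_cases hl : ((PySem.Dict.ofList sortedwords).getD (pvSortKey x.toList) []).length > 1 <;>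
      simp [hc, hl]
  · have hb : (n == 0) = false := by simpa using h0
    have hn : 0 < n := lt_of_le_of_ne hpre (Ne.symm h0)
    simp only [hb, Bool.false_eq_true, if_false]
    apply PySem.List.foldl_congr_mem
    intro acc x _
    rw [pv_foldl_if_add (fun xadd : String => (PySem.Dict.ofList sortedwords).contains
        (pvSortKey (x.toList ++ xadd.toList))) x]
    have hy : (if pvPool.length < n.toNat then []
        else PySem.List.permutations pvPool n.toNat)
        = PySem.List.permutations pvPool n.toNat := by
      split_ifs with hlt
      · rw [PySem.List.permutations_eq_nil_of_length_lt _ _ hlt]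
      · rfl
    rw [hy, List.any_map]
    have hinv : ∀ u v : List Char, u.Perm v →
        ((PySem.Dict.ofList sortedwords).contains (pvSortKey (x.toList ++ u)))
          = ((PySem.Dict.ofList sortedwords).contains (pvSortKey (x.toList ++ v))) := by
      intro u v huv
      have : pvSortKey (x.toList ++ u) = pvSortKey (x.toList ++ v) := by
        unfold pvSortKey
        rw [(PySem.List.sorted_id_eq_sorted_id_iff_perm _ _).mpr (huv.append_left x.toList)]
      rw [this]
    have := pv_any_perm_eq_any_comb pvPool n.toNat
      (fun t => (PySem.Dict.ofList sortedwords).contains (pvSortKey (x.toList ++ t))) hinv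
    simp only [Function.comp_def, String.toList_ofList]
    rw [this, pv_comb_eq_cores _ x n.toNat]
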